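-- pv_equiv track=rewrite | github.com/dust-tt/dust | front/lib/api/sandbox/image/profile/_dust_tools.py | desanitize
-- ===== SOURCE A (Python) =====
-- DESANITIZATIONS = {
--     "<fnr>": "<function_results>",
--     "<n>": "<name>",
--     "</n>": "</name>",
--     "<o>": "<output>",
--     "</o>": "</output>",
--     "<e>": "<error>",
--     "</e>": "</error>",
--     "<s>": "<system>",
--     "</s>": "</system>",
--     "<r>": "<result>",
--     "</r>": "</result>",
-- }
--
-- def desanitize(s):
--     applied = []
--     result = s
--     for sanitized, original in DESANITIZATIONS.items():
--         if sanitized in result: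
--             result = result.replace(sanitized, original)
--             applied.append((sanitized, original))
--     return result, applied
-- ===== SOURCE B (Python) =====
-- _SHORT = ["<fnr>", "<n>", "</n>", "<o>", "</o>", "<e>", "</e>", "<s>", "</s>", "<r>", "</r>"]
-- _FULL = ["<function_results>", "<name>", "</name>", "<output>", "</output>", "<error>",
--          "</error>", "<system>", "</system>", "<result>", "</result>"]
-- DESANITIZATIONS = dict(zip(_SHORT, _FULL))
--
--
-- def desanitize(s):
--     # `applied` is judged against the original string, in table order, at most
--     # once per tag (expansions never introduce or destroy short tags, so this
--     # matches the sequential-replace semantics of doing one pass per tag).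
--     applied = [(k, v) for k, v in DESANITIZATIONS.items() if k in s]
--     parts = []
--     i = 0
--     n = len(s)
--     while i < n:
--         for k, v in DESANITIZATIONS.items():
--             if s.startswith(k, i):
--                 parts.append(v)
--                 i += len(k)
--                 break
--         else:
--             parts.append(s[i])
--             i += 1
--     return "".join(parts), applied
-- ===== Notes on version B (the rewrite author's own statement) =====
-- stated objective: alternative
-- what changed: Replaces the 11 sequential full-string str.replace passes with a single left-to-right scan that expands whichever short tag matches at each position, and computes the applied list independently by a membership filter over the original string (valid because the short tags never overlap, never prefix one another, and the expansions contain no short tags).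
import Mathlib
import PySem

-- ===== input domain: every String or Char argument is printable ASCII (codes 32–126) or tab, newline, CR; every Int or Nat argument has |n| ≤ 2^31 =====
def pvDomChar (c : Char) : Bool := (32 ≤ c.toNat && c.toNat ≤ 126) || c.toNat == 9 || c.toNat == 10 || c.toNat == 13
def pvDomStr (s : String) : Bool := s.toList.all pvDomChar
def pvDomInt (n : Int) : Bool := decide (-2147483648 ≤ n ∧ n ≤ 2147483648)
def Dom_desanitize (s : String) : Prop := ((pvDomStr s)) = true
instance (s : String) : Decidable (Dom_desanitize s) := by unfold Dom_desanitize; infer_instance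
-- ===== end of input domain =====

-- B replaces A's 11 sequential full-string replace passes by one left-to-right scan
-- (plus an independent membership filter for `applied`); proved to return the same value.

-- ===== PORT A =====
-- DESANITIZATIONS dict, in insertion order
def pairsA : List (String × String) :=
  [("<fnr>", "<function_results>"), ("<n>", "<name>"), ("</n>", "</name>"),
   ("<o>", "<output>"), ("</o>", "</output>"), ("<e>", "<error>"), ("</e>", "</error>"),
   ("<s>", "<system>"), ("</s>", "</system>"), ("<r>", "<result>"), ("</r>", "</result>")]

def desanitize (s : String) : String × (List (String × String)) :=
  pairsA.foldl
    (fun st kv =>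
      if PySem.Str.isIn kv.1 st.1 then (PySem.Str.replace st.1 kv.1 kv.2, st.2 ++ [kv]) else st)
    (s, [])

-- ===== PORT B =====
-- inner `for … break/else`: first pair whose key matches at the current position
def matchAt : List (String × String) → List Char → Option (String × List Char)
  | [], _ => none
  | (k, v) :: rest, l =>
    if k.toList.isPrefixOf l then some (v, l.drop k.toList.length) else matchAt rest l

-- termination helper for scanB (all keys of pairsA are nonempty)
theorem matchAt_shrinks : ∀ (ps : List (String × String)) (l : List Char) (v : String)
    (r : List Char), (∀ kv ∈ ps, kv.1.toList ≠ []) → matchAt ps l = some (v, r) →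
    r.length < l.length := by
  intro ps
  induction ps with
  | nil => intro l v r _ h; simp [matchAt] at h
  | cons kv rest ih =>
    intro l v r hne h
    obtain ⟨k, w⟩ := kv
    rw [matchAt] at h
    by_cases hp : k.toList.isPrefixOf l = true
    · rw [if_pos hp] at h
      obtain ⟨-, rfl⟩ : w = v ∧ r = l.drop k.toList.length := by
        cases h; exact ⟨rfl, rfl⟩
      have hkne : k.toList ≠ [] := hne (k, w) (by simp)
      have hle := (List.isPrefixOf_iff_prefix.mp hp).length_le
      have hpos : 0 < k.toList.length := List.length_pos_iff.mpr hkne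
      simp only [List.length_drop]
      omega
    · rw [if_neg hp] at h
      exact ih l v r (fun kv h' => hne kv (by simp [h'])) h

-- the while-loop over `i` of Source B, as recursion on the remaining suffix
def scanB (l : List Char) : List Char :=
  match h : matchAt pairsA l with
  | some (v, r) => v.toList ++ scanB r
  | none =>
    match l with
    | [] => []
    | c :: t => c :: scanB t
termination_by l.length
decreasing_by
  · exact matchAt_shrinks pairsA l v r (by decide) h
  · simp

def desanitize_alt (s : String) : String × (List (String × String)) :=
  (String.ofList (scanB s.toList), pairsA.filter (fun kv => PySem.Str.isIn kv.1 s))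

-- ===== PRECONDITION & SPEC =====
def Spec_desanitize (s : String) (out : String × (List (String × String))) : Prop := out = desanitize_alt s
instance (s : String) (out : String × (List (String × String))) : Decidable (Spec_desanitize s out) := by unfold Spec_desanitize; infer_instance

-- ===== CLAIM (what is proved, stated in full; the proofs are below) =====
def Claim_equal_desanitize : Prop := ∀ (s : String), Dom_desanitize s → Spec_desanitize s (desanitize s)

-- ===== LEMMAS AND PROOFS =====

-- Python's str.replace for a nonempty pattern, as clean structural recursion
def rep (a : Char) (k' : List Char) (v : List Char) (s : List Char) : List Char :=
  match s with
  | [] => []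
  | c :: t =>
    if (a :: k').isPrefixOf (c :: t) then v ++ rep a k' v (t.drop k'.length)
    else c :: rep a k' v t
termination_by s.length
decreasing_by all_goals simp

theorem go_eq (a : Char) (k' v : List Char) :
    ∀ (fuel : Nat) (l acc : List Char), l.length ≤ fuel →
      PySem.Chars.replace.go (a :: k') v fuel l acc = acc.reverse ++ rep a k' v l := by
  intro fuel
  induction fuel with
  | zero =>
    intro l acc h
    have : l = [] := List.length_eq_zero_iff.mp (Nat.le_zero.mp h)
    subst this
    rw [PySem.Chars.replace.go, rep]
  | succ n ih =>
    intro l acc h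
    match l with
    | [] =>
      rw [PySem.Chars.replace.go, rep]
      · simp
      · omega
    | c :: t =>
      rw [PySem.Chars.replace.go]
      by_cases hp : (a :: k').isPrefixOf (c :: t) = true
      · rw [if_pos hp, rep, if_pos hp, ih _ _ (by simp at h ⊢; omega)]
        simp
      · rw [if_neg hp, rep, if_neg hp, ih _ _ (by simp at h; omega)]
        simp

theorem replace_eq_rep (a : Char) (k' v s : List Char) :
    PySem.Chars.replace s (a :: k') v = rep a k' v s := by
  rw [PySem.Chars.replace]
  simp [go_eq a k' v s.length s [] (le_refl _)]

-- `repL` applies rep for a possibly-unstructured key (our keys are never [])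
def repL (k v s : List Char) : List Char :=
  match k with
  | [] => s
  | a :: k' => rep a k' v s

-- a "tag-like" chunk: starts with '<' and contains no further '<'
def Tag (x : List Char) : Prop := x.head? = some '<' ∧ '<' ∉ x.tail

theorem tag_shape {x : List Char} (h : Tag x) : ∃ t, x = '<' :: t ∧ '<' ∉ t := by
  obtain ⟨h1, h2⟩ := h
  match x with
  | [] => simp at h1
  | c :: t => simp at h1; exact ⟨t, by simp [h1], by simpa using h2⟩

theorem head_shape {x : List Char} (h : x.head? = some '<') : ∃ t, x = '<' :: t := by
  match x with
  | [] => simp at h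
  | c :: t =>
    simp at h
    exact ⟨t, by simp [h]⟩

-- basic rep equations / passes
theorem rep_nil (a : Char) (k' v : List Char) : rep a k' v [] = [] := by rw [rep]

theorem nomatch_step {a c : Char} {k' : List Char} (v t : List Char)
    (h : ¬ (a :: k') <+: (c :: t)) : rep a k' v (c :: t) = c :: rep a k' v t := by
  rw [rep, if_neg (by simpa [List.isPrefixOf_iff_prefix] using h)]

theorem front_match (a : Char) (k' v u : List Char) :
    rep a k' v ((a :: k') ++ u) = v ++ rep a k' v u := by
  rw [List.cons_append, rep, if_pos]
  · simp
  · simp [List.isPrefixOf_iff_prefix]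

theorem pass_tail {a : Char} (k' v : List Char) {b : List Char} (ha : a = '<')
    (hb : '<' ∉ b) (u : List Char) : rep a k' v (b ++ u) = b ++ rep a k' v u := by
  induction b with
  | nil => simp
  | cons x b' ih =>
    have hx : x ≠ '<' := fun h => hb (by simp [h])
    rw [List.cons_append,
        nomatch_step _ _ (fun h => hx ((List.cons_prefix_cons.mp h).1.symm.trans ha)),
        ih (fun h => hb (by simp [h])), List.cons_append]

theorem pass {a : Char} {k' b : List Char} (v : List Char) (ha : a = '<') (hb : Tag b)
    (h1 : ¬ (a :: k') <+: b) (h2 : ¬ b <+: (a :: k')) (u : List Char) :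
    rep a k' v (b ++ u) = b ++ rep a k' v u := by
  obtain ⟨b₁, rfl, hb₁⟩ := tag_shape hb
  rw [List.cons_append, nomatch_step, pass_tail k' v ha hb₁ u, List.cons_append]
  intro h
  rw [List.cons_prefix_cons] at h
  rcases List.prefix_or_prefix_of_prefix h.2 (List.prefix_append b₁ u) with h3 | h3
  · exact h1 (by rw [List.cons_prefix_cons]; exact ⟨ha, h3⟩)
  · exact h2 (by rw [List.cons_prefix_cons]; exact ⟨ha.symm, h3⟩)

theorem rep_id {a : Char} {k' u : List Char} (v : List Char)
    (h : ¬ (a :: k') <:+: u) : rep a k' v u = u := by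
  induction u with
  | nil => exact rep_nil a k' v
  | cons c t ih =>
    rw [nomatch_step]
    · rw [ih (fun h' => h (List.infix_cons_iff.mpr (Or.inr h')))]
    · exact fun h' => h (List.infix_cons_iff.mpr (Or.inl h'))

theorem pfx_fwd {a : Char} {k' p u : List Char} (v : List Char) (ha : a = '<')
    (hp : '<' ∉ p) (h : p <+: u) : p <+: rep a k' v u := by
  induction u using rep.induct a k' generalizing p with
  | case1 =>
    have : p = [] := by simpa using h
    subst this
    simp
  | case2 c t hm ih =>
    match p, h with
    | [], _ => simp
    | x :: p', h =>
      rw [List.cons_prefix_cons] at h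
      have hc : c = '<' := by
        have h' := List.cons_prefix_cons.mp (List.isPrefixOf_iff_prefix.mp hm)
        exact h'.1.symm.trans ha
      exact absurd (h.1.trans hc) (fun hx => hp (by simp [hx]))
  | case3 c t hm ih =>
    match p, h with
    | [], _ => simp
    | x :: p', h =>
      rw [List.cons_prefix_cons] at h
      rw [rep, if_neg hm, List.cons_prefix_cons]
      exact ⟨h.1, ih (fun hh => hp (by simp [hh])) h.2⟩

theorem pfx_back {a : Char} {k' p u : List Char} {v : List Char} (ha : a = '<')
    (hv : v.head? = some '<') (hp : '<' ∉ p) (h : p <+: rep a k' v u) : p <+: u := by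
  induction u using rep.induct a k' generalizing p with
  | case1 => rw [rep_nil] at h; exact h
  | case2 c t hm ih =>
    rw [rep, if_pos hm] at h
    match p, h with
    | [], _ => simp
    | x :: p', h =>
      obtain ⟨v₁, rfl⟩ := head_shape hv
      rw [List.cons_append, List.cons_prefix_cons] at h
      exact absurd h.1 (fun hx => hp (by simp [hx]))
  | case3 c t hm ih =>
    rw [rep, if_neg hm] at h
    match p, h with
    | [], _ => simp
    | x :: p', h =>
      rw [List.cons_prefix_cons] at h ⊢
      exact ⟨h.1, ih (fun hh => hp (by simp [hh])) h.2⟩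

-- an infix that starts with '<' inside a tag-like chunk can only sit at the front
theorem infix_lt {x q : List Char} (hx : Tag x) (hq : q.head? = some '<')
    (h : q <:+: x) : q <+: x := by
  obtain ⟨x₁, rfl, hx₁⟩ := tag_shape hx
  obtain ⟨s, t, hst⟩ := h
  match s with
  | [] => exact ⟨t, by simpa using hst⟩
  | y :: s' =>
    exfalso
    obtain ⟨q₁, rfl⟩ := head_shape hq
    apply hx₁
    rw [List.cons_append, List.cons_append] at hst
    have := (List.cons.injEq _ _ _ _).mp hst
    rw [← this.2]
    simp

-- a nonempty suffix of a tag-like chunk starting with '<' is the whole chunk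
theorem suffix_lt {x w : List Char} (hx : Tag x) (hw : w.head? = some '<')
    (h : w <:+ x) : w = x := by
  obtain ⟨x₁, rfl, hx₁⟩ := tag_shape hx
  obtain ⟨s, hs⟩ := h
  match s with
  | [] => simpa using hs
  | y :: s' =>
    exfalso
    obtain ⟨w₁, rfl⟩ := head_shape hw
    apply hx₁
    have hx : x₁ = s' ++ '<' :: w₁ := by
      rw [List.cons_append] at hs
      exact ((List.cons.injEq _ _ _ _).mp hs).2.symm
    rw [hx]
    simp

theorem prefix_append_split {q x y : List Char} (h : q <+: x ++ y) :
    q <+: x ∨ ∃ q₂, q = x ++ q₂ ∧ q₂ <+: y := by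
  by_cases hle : q.length ≤ x.length
  · left
    have h' : q = x.take q.length := by
      rw [List.prefix_iff_eq_take] at h
      conv_lhs => rw [h]
      rw [List.take_append_of_le_length hle]
    rw [h']
    exact List.take_prefix _ _
  · right
    rcases List.prefix_or_prefix_of_prefix (List.prefix_append x y) h with h' | h'
    · obtain ⟨q₂, hq₂⟩ := h'
      refine ⟨q₂, hq₂.symm, ?_⟩
      obtain ⟨t, ht⟩ := h
      rw [← hq₂, List.append_assoc] at ht
      exact ⟨t, List.append_cancel_left ht⟩
    · exact absurd h'.length_le (by omega)

theorem infix_append_split {q x y : List Char} (h : q <:+: x ++ y) :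
    q <:+: x ∨ q <:+: y ∨ ∃ q₁ q₂, q = q₁ ++ q₂ ∧ q₁ ≠ [] ∧ q₂ ≠ [] ∧ q₁ <:+ x ∧ q₂ <+: y := by
  induction x with
  | nil => exact Or.inr (Or.inl (by simpa using h))
  | cons c x' ih =>
    rw [List.cons_append, List.infix_cons_iff] at h
    rcases h with h | h
    · rw [← List.cons_append] at h
      rcases prefix_append_split h with h' | ⟨q₂, hq, h'⟩
      · exact Or.inl h'.isInfix
      · match q₂, h' with
        | [], _ =>
          left
          rw [hq, List.append_nil]
        | z :: q₂', h' =>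
          exact Or.inr (Or.inr ⟨c :: x', z :: q₂', hq, by simp, by simp, List.suffix_refl _, h'⟩)
    · rcases ih h with h' | h' | ⟨q₁, q₂, hq, h1, h2, h3, h4⟩
      · exact Or.inl (h'.trans (List.suffix_cons c x').isInfix)
      · exact Or.inr (Or.inl h')
      · exact Or.inr (Or.inr ⟨q₁, q₂, hq, h1, h2, h3.trans (List.suffix_cons c x'), h4⟩)

theorem prefix_decomp {p u : List Char} (h : p <+: u) : u = p ++ u.drop p.length := by
  obtain ⟨t, ht⟩ := h
  rw [← ht, List.drop_left]

-- the central invariance: a replace pass neither creates nor destroys occurrences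
-- of a different tag q
theorem infix_iff {a : Char} {k' v q u : List Char} (ha : a = '<')
    (hk : Tag (a :: k')) (hv : Tag v) (hq : Tag q)
    (h1 : ¬ q <+: (a :: k')) (h2 : ¬ (a :: k') <+: q)
    (h3 : ¬ q <+: v) (h4 : ¬ v <+: q) :
    (q <:+: rep a k' v u ↔ q <:+: u) := by
  induction u using rep.induct a k' with
  | case1 => rw [rep_nil]
  | case2 c t hm ih =>
    have hpre := List.isPrefixOf_iff_prefix.mp hm
    have hdec : c :: t = (a :: k') ++ (t.drop k'.length) := by
      have := prefix_decomp hpre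
      simpa using this
    rw [rep, if_pos hm]
    constructor
    · intro h
      rcases infix_append_split h with h' | h' | ⟨q₁, q₂, hqq, hn1, hn2, hs, hp⟩
      · exact absurd (infix_lt hv hq.1 h') h3
      · rw [hdec]
        exact (ih.mp h').trans (List.suffix_append _ _).isInfix
      · exfalso
        have hq₁ : q₁.head? = some '<' := by
          obtain ⟨qt, hqt, -⟩ := tag_shape hq
          match q₁, hn1 with
          | z :: q₁', _ =>
            have : z = '<' := by
              have := hqt ▸ hqq
              simpa using (List.cons.injEq _ _ _ _ ▸ this).1.symm
            simp [this]
        have := suffix_lt hv hq₁ hs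
        subst this
        exact h4 ⟨q₂, hqq.symm⟩
    · intro h
      rw [hdec] at h
      rcases infix_append_split h with h' | h' | ⟨q₁, q₂, hqq, hn1, hn2, hs, hp⟩
      · exact absurd (infix_lt hk hq.1 h') h1
      · exact (ih.mpr h').trans (List.suffix_append _ _).isInfix
      · exfalso
        have hq₁ : q₁.head? = some '<' := by
          obtain ⟨qt, hqt, -⟩ := tag_shape hq
          match q₁, hn1 with
          | z :: q₁', _ =>
            have : z = '<' := by
              have := hqt ▸ hqq
              simpa using (List.cons.injEq _ _ _ _ ▸ this).1.symm
            simp [this]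
        have := suffix_lt hk hq₁ hs
        subst this
        exact h2 ⟨q₂, hqq.symm⟩
  | case3 c t hm ih =>
    rw [rep, if_neg hm]
    obtain ⟨q₁, hq₁, hq₁'⟩ := tag_shape hq
    subst hq₁
    rw [List.infix_cons_iff, List.infix_cons_iff]
    constructor
    · rintro (h | h)
      · match c, h with
        | _, h =>
          rw [List.cons_prefix_cons] at h
          exact Or.inl (List.cons_prefix_cons.mpr ⟨h.1, pfx_back ha hv.1 hq₁' h.2⟩)
      · exact Or.inr (ih.mp h)
    · rintro (h | h)
      · rw [List.cons_prefix_cons] at h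
        exact Or.inl (List.cons_prefix_cons.mpr ⟨h.1, pfx_fwd v ha hq₁' h.2⟩)
      · exact Or.inr (ih.mpr h)

-- ===== chain level: A's sequence of passes =====
def chainRes (ps : List (List Char × List Char)) (l : List Char) : List Char :=
  ps.foldl (fun r kv => repL kv.1 kv.2 r) l

theorem chainRes_cons (kv : List Char × List Char) (ps : List (List Char × List Char))
    (l : List Char) : chainRes (kv :: ps) l = chainRes ps (repL kv.1 kv.2 l) := rfl

theorem chain_nil {ps : List (List Char × List Char)}
    (h : ∀ kv ∈ ps, kv.1 ≠ []) : chainRes ps [] = [] := by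
  induction ps with
  | nil => rfl
  | cons kv rest ih =>
    rw [chainRes_cons]
    rcases hk : kv.1 with _ | ⟨a, k'⟩
    · exact absurd hk (h kv (by simp))
    · rw [repL, rep_nil]
      exact ih (fun kv' h' => h kv' (by simp [h']))

theorem chain_pass {ps : List (List Char × List Char)} {b : List Char} (hb : Tag b)
    (h : ∀ kv ∈ ps, Tag kv.1 ∧ ¬ kv.1 <+: b ∧ ¬ b <+: kv.1) :
    ∀ u, chainRes ps (b ++ u) = b ++ chainRes ps u := by
  induction ps with
  | nil => intro u; rfl
  | cons kv rest ih =>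
    intro u
    obtain ⟨hT, h1, h2⟩ := h kv (by simp)
    obtain ⟨k₁, hk, -⟩ := tag_shape hT
    rw [chainRes_cons, chainRes_cons, hk, repL, repL,
        pass kv.2 rfl hb (hk ▸ h1) (hk ▸ h2)]
    exact ih (fun kv' h' => h kv' (by simp [h'])) _

theorem chain_frontkey {ps₁ ps₂ : List (List Char × List Char)} {k v : List Char}
    (hk : Tag k) (hv : Tag v)
    (h1 : ∀ kv ∈ ps₁, Tag kv.1 ∧ ¬ kv.1 <+: k ∧ ¬ k <+: kv.1)
    (h2 : ∀ kv ∈ ps₂, Tag kv.1 ∧ ¬ kv.1 <+: v ∧ ¬ v <+: kv.1)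
    (u : List Char) :
    chainRes (ps₁ ++ (k, v) :: ps₂) (k ++ u) = v ++ chainRes (ps₁ ++ (k, v) :: ps₂) u := by
  have hfold : ∀ l, chainRes (ps₁ ++ (k, v) :: ps₂) l
      = chainRes ps₂ (repL k v (chainRes ps₁ l)) := by
    intro l
    simp [chainRes, List.foldl_append]
  rw [hfold, hfold, chain_pass hk h1 u]
  obtain ⟨k₁, hkk, -⟩ := tag_shape hk
  rw [hkk, repL, repL, front_match, chain_pass hv h2]

theorem chain_cons {ps : List (List Char × List Char)} {c : Char} :
    ∀ {t : List Char}, (∀ kv ∈ ps, Tag kv.1 ∧ Tag kv.2 ∧ ¬ kv.1 <+: c :: t) →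
    chainRes ps (c :: t) = c :: chainRes ps t := by
  induction ps with
  | nil => intro t _; rfl
  | cons kv rest ih =>
    intro t h
    obtain ⟨hK, hV, hNp⟩ := h kv (by simp)
    obtain ⟨k₁, hk, hk'⟩ := tag_shape hK
    rw [chainRes_cons, chainRes_cons, hk, repL, repL, nomatch_step _ _ (hk ▸ hNp)]
    apply ih
    intro kv' hkv'
    obtain ⟨hK', hV', hNp'⟩ := h kv' (by simp [hkv'])
    refine ⟨hK', hV', ?_⟩
    obtain ⟨x, hx, hx'⟩ := tag_shape hK'
    rw [hx, List.cons_prefix_cons]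
    rintro ⟨hc, hpfx⟩
    have : x <+: t := pfx_back rfl hV.1 hx' hpfx
    exact hNp' (hx ▸ List.cons_prefix_cons.mpr ⟨hc, this⟩)

-- ===== concrete facts about the tag table =====
def pairsC : List (List Char × List Char) := pairsA.map (fun kv => (kv.1.toList, kv.2.toList))

theorem okC1 : ∀ kv ∈ pairsC, Tag kv.1 ∧ Tag kv.2 ∧ ¬ kv.1 <+: kv.2 ∧ ¬ kv.2 <+: kv.1 := by
  simp only [Tag]; decide

theorem okC2 : ∀ kv ∈ pairsC, ∀ kv' ∈ pairsC,
    kv.1 = kv'.1 ∨ (¬ kv.1 <+: kv'.1 ∧ ¬ kv'.1 <+: kv.1) := by decide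

theorem okC3 : ∀ kv ∈ pairsC, ∀ kv' ∈ pairsC, ¬ kv.1 <+: kv'.2 ∧ ¬ kv'.2 <+: kv.1 := by decide

theorem keysNodup : (pairsA.map (fun kv => kv.1.toList)).Nodup := by decide

-- ===== matchAt characterisation =====
theorem matchAt_some {v : String} : ∀ {ps : List (String × String)} {l r : List Char},
    matchAt ps l = some (v, r) →
    ∃ ps₁ k ps₂, ps = ps₁ ++ (k, v) :: ps₂ ∧ k.toList <+: l ∧ r = l.drop k.toList.length ∧
      ∀ kv ∈ ps₁, ¬ kv.1.toList <+: l := by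
  intro ps
  induction ps with
  | nil => intro l r h; simp [matchAt] at h
  | cons kv rest ih =>
    intro l r h
    obtain ⟨k0, v0⟩ := kv
    rw [matchAt] at h
    by_cases hp : k0.toList.isPrefixOf l = true
    · rw [if_pos hp] at h
      obtain ⟨rfl, rfl⟩ : v0 = v ∧ l.drop k0.toList.length = r := by
        cases h; exact ⟨rfl, rfl⟩
      exact ⟨[], k0, rest, by simp, List.isPrefixOf_iff_prefix.mp hp, rfl, by simp⟩
    · rw [if_neg hp] at h
      obtain ⟨ps₁, k, ps₂, e, hpfx, hr, hnone⟩ := ih h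
      refine ⟨(k0, v0) :: ps₁, k, ps₂, by simp [e], hpfx, hr, ?_⟩
      intro kv hkv
      rcases List.mem_cons.mp hkv with rfl | h'
      · simpa [List.isPrefixOf_iff_prefix] using hp
      · exact hnone kv h' 

theorem matchAt_none : ∀ {ps : List (String × String)} {l : List Char},
    matchAt ps l = none → ∀ kv ∈ ps, ¬ kv.1.toList <+: l := by
  intro ps
  induction ps with
  | nil => intro l _ kv h; simp at h
  | cons kv0 rest ih =>
    intro l h kv hkv
    obtain ⟨k0, v0⟩ := kv0
    rw [matchAt] at h
    by_cases hp : k0.toList.isPrefixOf l = true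
    · rw [if_pos hp] at h; exact absurd h (by simp)
    · rw [if_neg hp] at h
      rcases List.mem_cons.mp hkv with rfl | h'
      · simpa [List.isPrefixOf_iff_prefix] using hp
      · exact ih h kv h'

-- ===== A's chain equals B's scan =====
theorem keysNe : ∀ kv ∈ pairsA, kv.1.toList ≠ [] := by decide

theorem matchAt_nil : ∀ {ps : List (String × String)},
    (∀ kv ∈ ps, kv.1.toList ≠ []) → matchAt ps [] = none := by
  intro ps
  induction ps with
  | nil => intro _; rfl
  | cons kv rest ih =>
    intro h
    obtain ⟨k, v⟩ := kv
    rw [matchAt, if_neg, ih (fun kv' h' => h kv' (by simp [h']))]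
    intro hp
    exact h (k, v) (by simp) (List.prefix_nil.mp (List.isPrefixOf_iff_prefix.mp hp))

theorem scanB_of_some {l : List Char} {v : String} {r : List Char}
    (h : matchAt pairsA l = some (v, r)) : scanB l = v.toList ++ scanB r := by
  rw [scanB]
  split
  · next v' r' heq =>
    rw [h] at heq
    obtain ⟨rfl, rfl⟩ : v = v' ∧ r = r' := by cases heq; exact ⟨rfl, rfl⟩
    rfl
  · next heq =>
    rw [h] at heq
    cases heq
theorem scanB_nil : scanB [] = [] := by
  rw [scanB]
  split
  · next v' r' heq =>
    rw [matchAt_nil keysNe] at heq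
    cases heq
  · rfl

theorem scanB_of_none_cons {c : Char} {t : List Char}
    (h : matchAt pairsA (c :: t) = none) : scanB (c :: t) = c :: scanB t := by
  rw [scanB]
  split
  · next v' r' heq =>
    rw [h] at heq
    cases heq
  · rfl

theorem chain_eq_scan : ∀ (n : Nat) (l : List Char), l.length ≤ n →
    chainRes pairsC l = scanB l := by
  intro n
  induction n with
  | zero =>
    intro l hl
    have hl0 : l = [] := List.length_eq_zero_iff.mp (Nat.le_zero.mp hl)
    subst hl0
    rw [scanB_nil]
    exact chain_nil (fun kv hkv => by
      obtain ⟨t, ht, -⟩ := tag_shape (okC1 kv hkv).1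
      simp [ht])
  | succ n ih =>
    intro l hl
    rcases hmatch : matchAt pairsA l with _ | ⟨v, r⟩
    · have hnp := matchAt_none hmatch
      match l with
      | [] =>
        rw [scanB_nil]
        exact chain_nil (fun kv hkv => by
          obtain ⟨t, ht, -⟩ := tag_shape (okC1 kv hkv).1
          simp [ht])
      | c :: t =>
        have h3 : ∀ kv ∈ pairsC, Tag kv.1 ∧ Tag kv.2 ∧ ¬ kv.1 <+: c :: t := by
          intro kv hkv
          have hkv' := hkv
          rw [pairsC] at hkv'
          obtain ⟨kv₀, hkv₀, rfl⟩ := List.mem_map.mp hkv'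
          exact ⟨(okC1 _ hkv).1, (okC1 _ hkv).2.1, hnp kv₀ hkv₀⟩
        rw [chain_cons h3, scanB_of_none_cons hmatch, ih t (by simp at hl; omega)]
    · obtain ⟨ps₁, k, ps₂, hps, hpfx, hr, hnone⟩ := matchAt_some hmatch
      have hkinP : (k, v) ∈ pairsA := by rw [hps]; simp
      have hkC : (k.toList, v.toList) ∈ pairsC := by
        rw [pairsC]
        exact List.mem_map_of_mem hkinP
      have hTagk : Tag k.toList := (okC1 _ hkC).1
      have hTagv : Tag v.toList := (okC1 _ hkC).2.1
      have hdec : l = k.toList ++ r := by rw [hr]; exact prefix_decomp hpfx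
      have hpcdec : pairsC = (ps₁.map (fun kv => (kv.1.toList, kv.2.toList)))
          ++ (k.toList, v.toList) :: (ps₂.map (fun kv => (kv.1.toList, kv.2.toList))) := by
        rw [pairsC, hps]
        simp
      have h1 : ∀ kv ∈ ps₁.map (fun kv => (kv.1.toList, kv.2.toList)),
          Tag kv.1 ∧ ¬ kv.1 <+: k.toList ∧ ¬ k.toList <+: kv.1 := by
        intro kv hkv
        have hkvC : kv ∈ pairsC := by rw [hpcdec]; exact List.mem_append_left _ hkv
        refine ⟨(okC1 _ hkvC).1, ?_⟩
        obtain ⟨kv₀, hkv₀, rfl⟩ := List.mem_map.mp hkv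
        have hne : kv₀.1.toList ≠ k.toList := fun he => hnone kv₀ hkv₀ (he ▸ hpfx)
        rcases okC2 _ hkvC _ hkC with he | hpp
        · exact absurd he hne
        · exact hpp
      have h2 : ∀ kv ∈ ps₂.map (fun kv => (kv.1.toList, kv.2.toList)),
          Tag kv.1 ∧ ¬ kv.1 <+: v.toList ∧ ¬ v.toList <+: kv.1 := by
        intro kv hkv
        have hkvC : kv ∈ pairsC := by
          rw [hpcdec]
          exact List.mem_append_right _ (List.mem_cons_of_mem _ hkv)
        exact ⟨(okC1 _ hkvC).1, okC3 _ hkvC _ hkC⟩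
      have hlen : r.length ≤ n := by
        obtain ⟨kt, hkt, -⟩ := tag_shape hTagk
        rw [hdec] at hl
        simp [hkt] at hl
        omega
      calc chainRes pairsC l = chainRes pairsC (k.toList ++ r) := by rw [← hdec]
        _ = v.toList ++ chainRes pairsC r := by
              rw [hpcdec]
              exact chain_frontkey hTagk hTagv h1 h2 r
        _ = v.toList ++ scanB r := by rw [ih r hlen]
        _ = scanB l := (scanB_of_some hmatch).symm

-- Bool equality from the underlying iff
theorem bool_iff {a b : Bool} (h : a = true ↔ b = true) : a = b := by
  cases a <;> cases b <;> simp_all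

-- ===== bridge: A's String-level fold =====
theorem bridgeA : ∀ (ps : List (String × String)) (r : String) (ap : List (String × String)),
    (∀ kv ∈ ps, kv ∈ pairsA) → ((ps.map (fun kv => kv.1.toList)).Nodup) →
    ps.foldl
      (fun st kv =>
        if PySem.Str.isIn kv.1 st.1 then (PySem.Str.replace st.1 kv.1 kv.2, st.2 ++ [kv]) else st)
      (r, ap)
    = (String.ofList (chainRes (ps.map (fun kv => (kv.1.toList, kv.2.toList))) r.toList),
       ap ++ ps.filter (fun kv => PySem.Str.isIn kv.1 r)) := by
  intro ps
  induction ps with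
  | nil =>
    intro r ap _ _
    simp [chainRes, String.ofList_toList]
  | cons kv rest ih =>
    intro r ap hsub hnd
    obtain ⟨k, v⟩ := kv
    have hkC : (k.toList, v.toList) ∈ pairsC := by
      rw [pairsC]
      exact List.mem_map_of_mem (hsub (k, v) (by simp))
    have hTagk : Tag k.toList := (okC1 _ hkC).1
    have hTagv : Tag v.toList := (okC1 _ hkC).2.1
    obtain ⟨k₁, hk₁, -⟩ := tag_shape hTagk
    have hnd' : (rest.map (fun kv => kv.1.toList)).Nodup :=
      (List.nodup_cons.mp (by simpa using hnd)).2
    have hnotin : k.toList ∉ rest.map (fun kv => kv.1.toList) :=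
      (List.nodup_cons.mp (by simpa using hnd)).1
    have hsub' : ∀ kv ∈ rest, kv ∈ pairsA := fun kv h' => hsub kv (by simp [h'])
    have hres : (PySem.Str.replace r k v).toList = rep '<' k₁ v.toList r.toList := by
      rw [PySem.Str.toList_replace, hk₁, replace_eq_rep]
    rw [List.map_cons, List.filter_cons, chainRes_cons]
    by_cases hin : PySem.Str.isIn k r = true
    · rw [show List.foldl
            (fun (st : String × List (String × String)) kv =>
              if PySem.Str.isIn kv.1 st.1 then (PySem.Str.replace st.1 kv.1 kv.2, st.2 ++ [kv]) else st)
            (r, ap) ((k, v) :: rest)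
          = List.foldl
            (fun st kv =>
              if PySem.Str.isIn kv.1 st.1 then (PySem.Str.replace st.1 kv.1 kv.2, st.2 ++ [kv]) else st)
            (PySem.Str.replace r k v, ap ++ [(k, v)]) rest from by
          rw [List.foldl_cons]
          congr 1
          show (if PySem.Str.isIn k r = true then (PySem.Str.replace r k v, ap ++ [(k, v)])
            else (r, ap)) = (PySem.Str.replace r k v, ap ++ [(k, v)])
          rw [if_pos hin]]
      rw [ih _ _ hsub' hnd']
      have hfc : rest.filter (fun kv => PySem.Str.isIn kv.1 (PySem.Str.replace r k v))
          = rest.filter (fun kv => PySem.Str.isIn kv.1 r) := by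
        apply List.filter_congr
        intro kv' h'
        have hqC : (kv'.1.toList, kv'.2.toList) ∈ pairsC := by
          rw [pairsC]
          exact List.mem_map_of_mem (hsub' kv' h')
        have hTagq : Tag kv'.1.toList := (okC1 _ hqC).1
        have hneq : kv'.1.toList ≠ k.toList := by
          intro he
          exact hnotin (he ▸ List.mem_map_of_mem h')
        have hkk : ¬ kv'.1.toList <+: k.toList ∧ ¬ k.toList <+: kv'.1.toList := by
          rcases okC2 _ hqC _ hkC with he | hpp
          · exact absurd he hneq
          · exact hpp
        have hkv2 := okC3 _ hqC _ hkC
        rw [PySem.Str.isIn_eq, PySem.Str.isIn_eq, hres]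
        apply bool_iff
        rw [PySem.Chars.isIn_iff_infix, PySem.Chars.isIn_iff_infix]
        exact infix_iff rfl (hk₁ ▸ hTagk) hTagv hTagq (hk₁ ▸ hkk.1) (hk₁ ▸ hkk.2) hkv2.1 hkv2.2
      rw [hfc, if_pos hin, hk₁, repL, ← hres]
      simp
    · rw [show List.foldl
            (fun (st : String × List (String × String)) kv =>
              if PySem.Str.isIn kv.1 st.1 then (PySem.Str.replace st.1 kv.1 kv.2, st.2 ++ [kv]) else st)
            (r, ap) ((k, v) :: rest)
          = List.foldl
            (fun st kv =>
              if PySem.Str.isIn kv.1 st.1 then (PySem.Str.replace st.1 kv.1 kv.2, st.2 ++ [kv]) else st)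
            (r, ap) rest from by
          rw [List.foldl_cons]
          congr 1
          show (if PySem.Str.isIn k r = true then (PySem.Str.replace r k v, ap ++ [(k, v)])
            else (r, ap)) = (r, ap)
          rw [if_neg hin]]
      rw [ih _ _ hsub' hnd']
      have hinF : PySem.Str.isIn k r = false := by simpa using hin
      have hninf : ¬ ('<' :: k₁) <:+: r.toList := by
        rw [← hk₁]
        apply (PySem.Chars.isIn_eq_false_iff _ _).mp
        rw [← PySem.Str.isIn_eq]
        exact hinF
      rw [if_neg hin, hk₁, repL, rep_id _ hninf]

-- ===== VERDICT (by name: the statement is the Claim_ definition above) =====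
theorem desanitize_spec : Claim_equal_desanitize := by
  intro s _
  show desanitize s = desanitize_alt s
  rw [desanitize, desanitize_alt, bridgeA pairsA s [] (fun kv h => h) keysNodup]
  have hmap : pairsA.map (fun kv => (kv.1.toList, kv.2.toList)) = pairsC := rfl
  rw [hmap, chain_eq_scan s.toList.length s.toList le_rfl]
  simp
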